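-- pv_equiv track=rewrite | github.com/jimon/adventofcode2018 | day21/1o.py | calc
-- ===== SOURCE A (Python) =====
-- def calc(r0):
-- 	r5 = 0
-- 	c = 0
-- 	while r5 != r0:
-- 		r = r5 | 0x10000
-- 		r5 = 10362650
-- 		r5 = (((r5 + ( r        & 0xff)) & 0xffffff) * 65899) & 0xffffff
-- 		r5 = (((r5 + ((r >>  8) & 0xff)) & 0xffffff) * 65899) & 0xffffff
-- 		r5 = (((r5 + ((r >> 16) & 0xff)) & 0xffffff) * 65899) & 0xffffff
-- 		c += 1
-- 		if c >= 4:
-- 			return None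
-- 	return c
-- ===== SOURCE B (Python) =====
-- # The hash recurrence does not depend on r0, so the only candidates A ever
-- # compares against r0 are four fixed constants (the initial 0 and the first
-- # three hash values). calc is therefore a plain table lookup.
-- _INDEX_BY_VALUE = {0: 0, 6778585: 1, 12447060: 2, 12012014: 3}
--
--
-- def calc(r0):
--     return _INDEX_BY_VALUE.get(r0)
-- ===== Notes on version B (the rewrite author's own statement) =====
-- stated objective: simpler
-- what changed: Observes that the hash sequence is input-independent, so the four candidate values A generates are fixed constants; B replaces the whole generate-and-check loop by a single lookup in a precomputed value-to-index table.
import Mathlib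
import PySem

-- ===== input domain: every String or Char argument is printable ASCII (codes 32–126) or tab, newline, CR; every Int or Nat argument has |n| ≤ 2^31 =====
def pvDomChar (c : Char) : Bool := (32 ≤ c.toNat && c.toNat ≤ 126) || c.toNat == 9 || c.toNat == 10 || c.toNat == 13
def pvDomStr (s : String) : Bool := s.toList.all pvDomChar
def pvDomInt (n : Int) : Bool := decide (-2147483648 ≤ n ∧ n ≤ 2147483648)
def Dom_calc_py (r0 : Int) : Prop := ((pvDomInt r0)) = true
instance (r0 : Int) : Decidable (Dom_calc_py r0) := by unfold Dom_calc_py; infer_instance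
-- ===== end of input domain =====

-- B exploits that A's hash sequence is input-independent: the four candidates are
-- fixed constants, so B is a single precomputed value-to-index table lookup
-- instead of A's generate-and-check loop; objective: simpler.

-- ===== PORT A =====
-- the while loop: r5=0, c=0; while r5 != r0 compute the next hash, c += 1, None at c >= 4.
-- fuel only bounds the recursion; the `c' >= 4` return fires before fuel can run out.
def calcGo (r0 : Int) : Int → Int → Nat → Option Int
  | r5, c, fuel =>
    if r5 ≠ r0 then
      match fuel with
      | 0 => none
      | f + 1 =>
        let r := PySem.Int.bor r5 0x10000
        let r5a := PySem.Int.band ((PySem.Int.band (10362650 + PySem.Int.band r 0xff) 0xffffff) * 65899) 0xffffff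
        let r5b := PySem.Int.band ((PySem.Int.band (r5a + PySem.Int.band (r >>> (8:Nat)) 0xff) 0xffffff) * 65899) 0xffffff
        let r5c := PySem.Int.band ((PySem.Int.band (r5b + PySem.Int.band (r >>> (16:Nat)) 0xff) 0xffffff) * 65899) 0xffffff
        let c' := c + 1
        if c' ≥ 4 then none else calcGo r0 r5c c' f
    else some c

def calc_py (r0 : Int) : Option Int := calcGo r0 0 0 4

-- ===== PORT B =====
def indexByValue : PySem.Dict Int Int :=
  PySem.Dict.ofList [(0, 0), (6778585, 1), (12447060, 2), (12012014, 3)]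

def calc_py_alt (r0 : Int) : Option Int := indexByValue.get? r0

-- ===== PRECONDITION & SPEC =====
def Spec_calc_py (r0 : Int) (out : Option Int) : Prop := out = calc_py_alt r0
instance (r0 : Int) (out : Option Int) : Decidable (Spec_calc_py r0 out) := by unfold Spec_calc_py; infer_instance

-- ===== CLAIM =====
def Claim_equal_calc_py : Prop := ∀ (r0 : Int), Dom_calc_py r0 → Spec_calc_py r0 (calc_py r0)

-- ===== LEMMAS AND PROOFS =====
-- one unrolling of A's loop in terms of the abstract hash step
def hashStep (r5 : Int) : Int :=
  let r := PySem.Int.bor r5 0x10000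
  let r5a := PySem.Int.band ((PySem.Int.band (10362650 + PySem.Int.band r 0xff) 0xffffff) * 65899) 0xffffff
  let r5b := PySem.Int.band ((PySem.Int.band (r5a + PySem.Int.band (r >>> (8:Nat)) 0xff) 0xffffff) * 65899) 0xffffff
  PySem.Int.band ((PySem.Int.band (r5b + PySem.Int.band (r >>> (16:Nat)) 0xff) 0xffffff) * 65899) 0xffffff

theorem calcGo_step (r0 r5 c : Int) (f : Nat) (h : r5 ≠ r0) (hc : c + 1 < 4) :
    calcGo r0 r5 c (f + 1) = calcGo r0 (hashStep r5) (c + 1) f := by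
  simp only [calcGo, hashStep, if_pos h, if_neg (not_le.mpr hc)]

theorem calcGo_last (r0 r5 c : Int) (f : Nat) (h : r5 ≠ r0) (hc : 4 ≤ c + 1) :
    calcGo r0 r5 c (f + 1) = none := by
  simp [calcGo, h, hc]

-- ===== VERDICT =====
theorem calc_py_spec : Claim_equal_calc_py := by
  intro r0 _
  unfold Spec_calc_py calc_py calc_py_alt
  by_cases h0 : r0 = 0
  · subst h0; decide
  by_cases h1 : r0 = 6778585
  · subst h1; decide
  by_cases h2 : r0 = 12447060
  · subst h2; decide
  by_cases h3 : r0 = 12012014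
  · subst h3; decide
  · have e1 : hashStep 0 = 6778585 := by decide
    have e2 : hashStep 6778585 = 12447060 := by decide
    have e3 : hashStep 12447060 = 12012014 := by decide
    rw [show (4:Nat) = 3 + 1 from rfl,
        calcGo_step r0 0 0 3 (Ne.symm h0) (by omega), e1,
        show (3:Nat) = 2 + 1 from rfl,
        calcGo_step r0 6778585 (0 + 1) 2 (Ne.symm h1) (by omega), e2,
        show (2:Nat) = 1 + 1 from rfl,
        calcGo_step r0 12447060 (0 + 1 + 1) 1 (Ne.symm h2) (by omega), e3,
        show (1:Nat) = 0 + 1 from rfl,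
        calcGo_last r0 12012014 (0 + 1 + 1 + 1) 0 (Ne.symm h3) (by omega)]
    have hd : indexByValue = PySem.Dict.mk [(0, 0), (6778585, 1), (12447060, 2), (12012014, 3)] := by rfl
    simp [hd, PySem.Dict.get?_mk_cons, PySem.Dict.get?, Ne.symm h0, Ne.symm h1, Ne.symm h2, Ne.symm h3]
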